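-- pv_equiv track=rewrite | github.com/asherthechamp/Coding-Problems | Problem Set One/rectangles.py | is_rect
-- ===== SOURCE A (Python) =====
-- def is_rect(p1, p2, points):
--
--     starti = min(p1[0], p2[0])
--     endi = max(p1[0], p2[0])
--     for i in range(starti, endi +1):
--         startj = min(p1[1], p2[1])
--         endj = max(p1[1], p2[1])
--         for j in range(startj, endj + 1):
--             if (i, j) in points.values():
--                 continue
--             else:
--                 return False
--     return True
-- ===== SOURCE B (Python) =====
-- def is_rect(p1, p2, points):
--     lo_i, hi_i = min(p1[0], p2[0]), max(p1[0], p2[0])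
--     lo_j, hi_j = min(p1[1], p2[1]), max(p1[1], p2[1])
--     area = (hi_i - lo_i + 1) * (hi_j - lo_j + 1)
--     covered = {(v[0], v[1]) for v in points.values()
--                if len(v) == 2 and lo_i <= v[0] <= hi_i and lo_j <= v[1] <= hi_j}
--     return len(covered) == area
-- ===== Notes on version B (the rewrite author's own statement) =====
-- stated objective: alternative
-- what changed: Instead of scanning every grid cell of the rectangle and testing it against points.values(), B makes one pass over the supplied points, collects the distinct in-bounds length-2 values into a set, and returns True iff their count equals the rectangle's area; it trades the per-cell membership scan for set construction plus a cardinality comparison.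
import Mathlib
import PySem

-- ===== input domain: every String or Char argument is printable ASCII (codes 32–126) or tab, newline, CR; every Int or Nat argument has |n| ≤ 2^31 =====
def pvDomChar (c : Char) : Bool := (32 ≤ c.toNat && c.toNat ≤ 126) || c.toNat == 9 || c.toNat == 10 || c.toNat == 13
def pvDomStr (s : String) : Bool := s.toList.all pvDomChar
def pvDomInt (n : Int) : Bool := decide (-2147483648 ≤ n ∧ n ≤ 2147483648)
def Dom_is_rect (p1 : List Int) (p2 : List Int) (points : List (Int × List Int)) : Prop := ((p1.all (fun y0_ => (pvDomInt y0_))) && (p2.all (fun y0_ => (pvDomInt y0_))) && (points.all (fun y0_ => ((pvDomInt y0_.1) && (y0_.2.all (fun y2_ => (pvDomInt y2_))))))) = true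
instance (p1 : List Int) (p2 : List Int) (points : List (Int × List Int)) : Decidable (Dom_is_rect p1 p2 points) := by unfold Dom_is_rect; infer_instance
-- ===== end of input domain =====

-- B replaces A's per-grid-cell scan (area × points membership tests) by a single pass over
-- the points: count the distinct in-bounds points and compare with the rectangle's area.

-- ===== PORT A =====
-- The two for-range loops with early 'return False' are ported as fuel recursions over the
-- loop counter (Python's range is lazy; materialising it as a list would not terminate on
-- large bounds where the Python returns quickly).
def is_rect_loopJ (points : List (Int × List Int)) (i j : Int) (fuel : Nat) : Bool :=
  match fuel with
  | 0 => true
  | f + 1 =>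
    if (points.map Prod.snd).any (fun v => [i, j] == v) then is_rect_loopJ points i (j + 1) f
    else false

def is_rect_loopI (p1 p2 : List Int) (points : List (Int × List Int)) (i : Int) (fuel : Nat) : Bool :=
  match fuel with
  | 0 => true
  | f + 1 =>
    let startj := min (PySem.List.pyGetD p1 1 0) (PySem.List.pyGetD p2 1 0)
    let endj := max (PySem.List.pyGetD p1 1 0) (PySem.List.pyGetD p2 1 0)
    if is_rect_loopJ points i startj (endj + 1 - startj).toNat then
      is_rect_loopI p1 p2 points (i + 1) f
    else false

def is_rect (p1 : List Int) (p2 : List Int) (points : List (Int × List Int)) : Bool :=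
  let starti := min (PySem.List.pyGetD p1 0 0) (PySem.List.pyGetD p2 0 0)
  let endi := max (PySem.List.pyGetD p1 0 0) (PySem.List.pyGetD p2 0 0)
  is_rect_loopI p1 p2 points starti (endi + 1 - starti).toNat


-- ===== PORT B =====
def is_rect_alt (p1 : List Int) (p2 : List Int) (points : List (Int × List Int)) : Bool :=
  let loi := min (PySem.List.pyGetD p1 0 0) (PySem.List.pyGetD p2 0 0)
  let hii := max (PySem.List.pyGetD p1 0 0) (PySem.List.pyGetD p2 0 0)
  let loj := min (PySem.List.pyGetD p1 1 0) (PySem.List.pyGetD p2 1 0)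
  let hij := max (PySem.List.pyGetD p1 1 0) (PySem.List.pyGetD p2 1 0)
  let area : Int := (hii - loi + 1) * (hij - loj + 1)
  let covered : PySem.Set (Int × Int) := PySem.Set.ofList
    ((points.map Prod.snd).filterMap (fun v =>
      if v.length = 2 ∧ loi ≤ PySem.List.pyGetD v 0 0 ∧ PySem.List.pyGetD v 0 0 ≤ hii ∧
         loj ≤ PySem.List.pyGetD v 1 0 ∧ PySem.List.pyGetD v 1 0 ≤ hij
      then some (PySem.List.pyGetD v 0 0, PySem.List.pyGetD v 1 0) else none))
  decide ((PySem.Set.len covered : Int) = area)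

-- ===== PRECONDITION & SPEC =====
-- Pre_ excludes exactly the inputs where A raises IndexError: p1 or p2 shorter than 2.
def Pre_is_rect (p1 : List Int) (p2 : List Int) (points : List (Int × List Int)) : Prop :=
  2 ≤ p1.length ∧ 2 ≤ p2.length
instance (p1 : List Int) (p2 : List Int) (points : List (Int × List Int)) : Decidable (Pre_is_rect p1 p2 points) := by unfold Pre_is_rect; infer_instance
def pvWitness_is_rect : List Int × List Int × (List (Int × List Int)) := ([0, 0], [1, 1], [(0, [0, 0])])

def Spec_is_rect (p1 : List Int) (p2 : List Int) (points : List (Int × List Int)) (out : Bool) : Prop := out = is_rect_alt p1 p2 points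
instance (p1 : List Int) (p2 : List Int) (points : List (Int × List Int)) (out : Bool) : Decidable (Spec_is_rect p1 p2 points out) := by unfold Spec_is_rect; infer_instance

-- ===== CLAIM (what is proved, stated in full; the proofs are below) =====
def Claim_equal_is_rect : Prop := ∀ (p1 : List Int) (p2 : List Int) (points : List (Int × List Int)), Dom_is_rect p1 p2 points → Pre_is_rect p1 p2 points → Spec_is_rect p1 p2 points (is_rect p1 p2 points)

-- ===== LEMMAS AND PROOFS =====

-- A is true exactly when every grid point of the rectangle occurs among the values.
theorem loopJ_iff (points : List (Int × List Int)) (i : Int) :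
    ∀ (fuel : Nat) (j : Int), is_rect_loopJ points i j fuel = true ↔
      ∀ k ∈ PySem.List.pyRange j (j + fuel) 1, [i, k] ∈ points.map Prod.snd := by
  intro fuel
  induction fuel with
  | zero =>
    intro j
    simp [is_rect_loopJ]
  | succ f ih =>
    intro j
    rw [PySem.List.pyRange_one_cons (by push_cast; omega : j < j + (f + 1 : Nat))]
    simp only [is_rect_loopJ, List.forall_mem_cons]
    constructor
    · intro h
      split at h
      · rename_i hm
        rw [List.any_eq_true] at hm
        obtain ⟨v, hv, he⟩ := hm
        rw [beq_iff_eq] at he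
        have h2 := (ih (j + 1)).mp h
        refine ⟨he ▸ hv, ?_⟩
        intro k hk
        apply h2
        have : j + (f + 1 : Nat) = j + 1 + (f : Nat) := by push_cast; omega
        rw [← this]; exact hk
      · exact absurd h (by simp)
    · rintro ⟨h1, h2⟩
      rw [if_pos (by rw [List.any_eq_true]; exact ⟨[i, j], h1, by simp⟩)]
      apply (ih (j + 1)).mpr
      intro k hk
      apply h2
      have : j + (f + 1 : Nat) = j + 1 + (f : Nat) := by push_cast; omega
      rw [this]; exact hk

theorem loopI_iff (p1 p2 : List Int) (points : List (Int × List Int)) :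
    ∀ (fuel : Nat) (i : Int), is_rect_loopI p1 p2 points i fuel = true ↔
      ∀ x ∈ PySem.List.pyRange i (i + fuel) 1,
      ∀ k ∈ PySem.List.pyRange (min (PySem.List.pyGetD p1 1 0) (PySem.List.pyGetD p2 1 0))
          (max (PySem.List.pyGetD p1 1 0) (PySem.List.pyGetD p2 1 0) + 1) 1,
        [x, k] ∈ points.map Prod.snd := by
  intro fuel
  induction fuel with
  | zero =>
    intro i
    simp [is_rect_loopI]
  | succ f ih =>
    intro i
    rw [PySem.List.pyRange_one_cons (by push_cast; omega : i < i + (f + 1 : Nat))]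
    simp only [is_rect_loopI, List.forall_mem_cons]
    have ebound : min (PySem.List.pyGetD p1 1 0) (PySem.List.pyGetD p2 1 0) +
        ((max (PySem.List.pyGetD p1 1 0) (PySem.List.pyGetD p2 1 0) + 1 -
          min (PySem.List.pyGetD p1 1 0) (PySem.List.pyGetD p2 1 0)).toNat : Int)
        = max (PySem.List.pyGetD p1 1 0) (PySem.List.pyGetD p2 1 0) + 1 := by
      have := min_le_max (a := PySem.List.pyGetD p1 1 0) (b := PySem.List.pyGetD p2 1 0)
      omega
    constructor
    · intro h
      split at h
      · rename_i hj
        have hrow := (loopJ_iff points i _ _).mp hj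
        rw [ebound] at hrow
        have hrest := (ih (i + 1)).mp h
        refine ⟨hrow, ?_⟩
        intro x hx
        apply hrest
        have : i + (f + 1 : Nat) = i + 1 + (f : Nat) := by push_cast; omega
        rw [← this]; exact hx
      · exact absurd h (by simp)
    · rintro ⟨h1, h2⟩
      rw [if_pos (by apply (loopJ_iff points i _ _).mpr; rw [ebound]; exact h1)]
      apply (ih (i + 1)).mpr
      intro x hx
      apply h2
      have : i + (f + 1 : Nat) = i + 1 + (f : Nat) := by push_cast; omega
      rw [this]; exact hx

theorem A_true_iff (p1 p2 : List Int) (points : List (Int × List Int)) :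
    is_rect p1 p2 points = true ↔
      (∀ i ∈ PySem.List.pyRange (min (PySem.List.pyGetD p1 0 0) (PySem.List.pyGetD p2 0 0))
            (max (PySem.List.pyGetD p1 0 0) (PySem.List.pyGetD p2 0 0) + 1) 1,
       ∀ j ∈ PySem.List.pyRange (min (PySem.List.pyGetD p1 1 0) (PySem.List.pyGetD p2 1 0))
            (max (PySem.List.pyGetD p1 1 0) (PySem.List.pyGetD p2 1 0) + 1) 1,
        [i, j] ∈ points.map Prod.snd) := by
  have ebound : min (PySem.List.pyGetD p1 0 0) (PySem.List.pyGetD p2 0 0) +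
      ((max (PySem.List.pyGetD p1 0 0) (PySem.List.pyGetD p2 0 0) + 1 -
        min (PySem.List.pyGetD p1 0 0) (PySem.List.pyGetD p2 0 0)).toNat : Int)
      = max (PySem.List.pyGetD p1 0 0) (PySem.List.pyGetD p2 0 0) + 1 := by
    have := min_le_max (a := PySem.List.pyGetD p1 0 0) (b := PySem.List.pyGetD p2 0 0)
    omega
  rw [is_rect]
  have h := loopI_iff p1 p2 points
    (max (PySem.List.pyGetD p1 0 0) (PySem.List.pyGetD p2 0 0) + 1 -
      min (PySem.List.pyGetD p1 0 0) (PySem.List.pyGetD p2 0 0)).toNat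
    (min (PySem.List.pyGetD p1 0 0) (PySem.List.pyGetD p2 0 0))
  rw [ebound] at h
  exact h

-- Counting core: the distinct in-bounds points number exactly the area iff every grid point occurs.
theorem core (loi hii loj hij : Int) (h1 : loi ≤ hii) (h2 : loj ≤ hij) (vals : List (List Int)) :
    (decide (((PySem.Set.len (PySem.Set.ofList (vals.filterMap (fun v =>
        if v.length = 2 ∧ loi ≤ PySem.List.pyGetD v 0 0 ∧ PySem.List.pyGetD v 0 0 ≤ hii ∧
           loj ≤ PySem.List.pyGetD v 1 0 ∧ PySem.List.pyGetD v 1 0 ≤ hij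
        then some (PySem.List.pyGetD v 0 0, PySem.List.pyGetD v 1 0) else none)))) : Int)
      = (hii - loi + 1) * (hij - loj + 1)) = true) ↔
    (∀ i ∈ PySem.List.pyRange loi (hii + 1) 1, ∀ j ∈ PySem.List.pyRange loj (hij + 1) 1,
      [i, j] ∈ vals) := by
  set L := (vals.filterMap (fun v =>
        if v.length = 2 ∧ loi ≤ PySem.List.pyGetD v 0 0 ∧ PySem.List.pyGetD v 0 0 ≤ hii ∧
           loj ≤ PySem.List.pyGetD v 1 0 ∧ PySem.List.pyGetD v 1 0 ≤ hij
        then some (PySem.List.pyGetD v 0 0, PySem.List.pyGetD v 1 0) else none)) with hL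
  have hlen2 : ∀ v : List Int, v.length = 2 → v = [PySem.List.pyGetD v 0 0, PySem.List.pyGetD v 1 0] := by
    intro v h
    match v, h with
    | [a, b], _ => simp [PySem.List.pyGetD, PySem.List.pyGet?, PySem.List.pyIdx?]
  have hmemL : ∀ q : Int × Int, q ∈ L ↔
      (loi ≤ q.1 ∧ q.1 ≤ hii ∧ loj ≤ q.2 ∧ q.2 ≤ hij ∧ [q.1, q.2] ∈ vals) := by
    intro q
    rw [hL, List.mem_filterMap]
    constructor
    · rintro ⟨v, hv, hf⟩
      split at hf
      · rename_i hc
        cases hf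
        refine ⟨hc.2.1, hc.2.2.1, hc.2.2.2.1, hc.2.2.2.2, ?_⟩
        simpa using (hlen2 v hc.1) ▸ hv
      · cases hf
    · rintro ⟨ha, hb, hc, hd, hm⟩
      refine ⟨[q.1, q.2], hm, ?_⟩
      have e0 : PySem.List.pyGetD [q.1, q.2] 0 0 = q.1 := by
        simp [PySem.List.pyGetD, PySem.List.pyGet?, PySem.List.pyIdx?]
      have e1 : PySem.List.pyGetD [q.1, q.2] 1 0 = q.2 := by
        simp [PySem.List.pyGetD, PySem.List.pyGet?, PySem.List.pyIdx?]
      rw [if_pos ⟨by simp, by rw [e0]; exact ha, by rw [e0]; exact hb, by rw [e1]; exact hc, by rw [e1]; exact hd⟩]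
      rw [e0, e1]
  set S := PySem.Set.ofList L with hS
  have hnd : S.Nodup := PySem.Set.nodup_ofList L
  have hmemS : ∀ q : Int × Int, q ∈ S ↔ q ∈ L := fun q => PySem.Set.mem_ofList L q
  set box : Finset (Int × Int) := Finset.Icc loi hii ×ˢ Finset.Icc loj hij with hbox
  have hsub : S.toFinset ⊆ box := by
    intro q hq
    rw [List.mem_toFinset, hmemS, hmemL] at hq
    simp [hbox, Finset.mem_product, Finset.mem_Icc]
    exact ⟨⟨hq.1, hq.2.1⟩, hq.2.2.1, hq.2.2.2.1⟩
  have hcardS : S.length = S.toFinset.card := (List.toFinset_card_of_nodup hnd).symm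
  have hboxcard : (box.card : Int) = (hii - loi + 1) * (hij - loj + 1) := by
    rw [hbox, Finset.card_product, Int.card_Icc, Int.card_Icc]
    push_cast
    rw [Int.toNat_of_nonneg (by omega), Int.toNat_of_nonneg (by omega)]
    ring
  have hlen : PySem.Set.len S = S.length := rfl
  rw [decide_eq_true_iff, hlen, hcardS]
  constructor
  · intro h i hi j hj
    have hSeq : S.toFinset = box := by
      apply Finset.eq_of_subset_of_card_le hsub
      have : (S.toFinset.card : Int) = (box.card : Int) := by rw [h, hboxcard]
      omega
    rw [PySem.List.mem_pyRange_one] at hi hj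
    have : (i, j) ∈ S.toFinset := by
      rw [hSeq]; simp [hbox, Finset.mem_Icc]; omega
    rw [List.mem_toFinset, hmemS, hmemL] at this
    exact this.2.2.2.2
  · intro h
    have hSeq : S.toFinset = box := by
      apply Finset.Subset.antisymm hsub
      intro q hq
      simp only [hbox, Finset.mem_product, Finset.mem_Icc] at hq
      rw [List.mem_toFinset, hmemS, hmemL]
      refine ⟨hq.1.1, hq.1.2, hq.2.1, hq.2.2, ?_⟩
      exact h q.1 (by rw [PySem.List.mem_pyRange_one]; omega) q.2 (by rw [PySem.List.mem_pyRange_one]; omega)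
    rw [hSeq, hboxcard]

-- B is true exactly when every grid point of the rectangle occurs among the values.
theorem alt_true_iff (p1 p2 : List Int) (points : List (Int × List Int)) :
    is_rect_alt p1 p2 points = true ↔
      (∀ i ∈ PySem.List.pyRange (min (PySem.List.pyGetD p1 0 0) (PySem.List.pyGetD p2 0 0))
            (max (PySem.List.pyGetD p1 0 0) (PySem.List.pyGetD p2 0 0) + 1) 1,
       ∀ j ∈ PySem.List.pyRange (min (PySem.List.pyGetD p1 1 0) (PySem.List.pyGetD p2 1 0))
            (max (PySem.List.pyGetD p1 1 0) (PySem.List.pyGetD p2 1 0) + 1) 1,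
        [i, j] ∈ points.map Prod.snd) := by
  have h := core (min (PySem.List.pyGetD p1 0 0) (PySem.List.pyGetD p2 0 0))
    (max (PySem.List.pyGetD p1 0 0) (PySem.List.pyGetD p2 0 0))
    (min (PySem.List.pyGetD p1 1 0) (PySem.List.pyGetD p2 1 0))
    (max (PySem.List.pyGetD p1 1 0) (PySem.List.pyGetD p2 1 0))
    (min_le_max) (min_le_max) (points.map Prod.snd)
  rw [← h]; rfl

-- ===== VERDICT (by name: the statement is the Claim_ definition above) =====
theorem is_rect_spec : Claim_equal_is_rect := by
  intro p1 p2 points _ _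
  have := (A_true_iff p1 p2 points).trans (alt_true_iff p1 p2 points).symm
  exact Bool.eq_iff_iff.mpr this
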